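-- pv_equiv track=rewrite | github.com/qeedquan/challenges | hacker_rank/s10-drawing-marbles.py | solve
-- ===== SOURCE A (Python) =====
-- from itertools import permutations
-- from math import gcd
--
-- def solve(reds, blues):
--     R = ['R'] * reds
--     B = ['B'] * blues
--
--     x, y = 0, 0
--     for m in permutations(R + B, 2):
--         if m[0] == 'R':
--             if m[1] == 'B':
--                 x += 1
--             y += 1
--
--     l = gcd(x, y)
--     return (x//l, y//l)
-- ===== SOURCE B (Python) =====
-- from math import gcd
--
-- def solve(reds, blues):
--     # Among ordered pairs of distinct marbles, reds*blues pairs are (R, B)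
--     # and reds*(reds+blues-1) pairs start with R; reduce the ratio by gcd.
--     x = reds * blues
--     y = reds * (reds + blues - 1)
--     l = gcd(x, y)
--     return (x // l, y // l)
-- ===== Notes on version B (the rewrite author's own statement) =====
-- stated objective: faster
-- what changed: replaces the quadratic enumeration of all ordered pairs of marbles by the closed-form counts x=reds*blues, y=reds*(reds+blues-1), then reduces by gcd; Pre_ restricts to the natural domain of nonnegative marble counts with at least one red and two marbles in total, outside which A either raises ZeroDivisionError or its value comes from Python's negative-count list-repetition accident
-- outside the precondition, e.g. on solve(3, -1): A returns (0, 1), B returns (-1, 1); on solve(2, -1000): A returns (0, 1), B returns (-1000, -999)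
import Mathlib
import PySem

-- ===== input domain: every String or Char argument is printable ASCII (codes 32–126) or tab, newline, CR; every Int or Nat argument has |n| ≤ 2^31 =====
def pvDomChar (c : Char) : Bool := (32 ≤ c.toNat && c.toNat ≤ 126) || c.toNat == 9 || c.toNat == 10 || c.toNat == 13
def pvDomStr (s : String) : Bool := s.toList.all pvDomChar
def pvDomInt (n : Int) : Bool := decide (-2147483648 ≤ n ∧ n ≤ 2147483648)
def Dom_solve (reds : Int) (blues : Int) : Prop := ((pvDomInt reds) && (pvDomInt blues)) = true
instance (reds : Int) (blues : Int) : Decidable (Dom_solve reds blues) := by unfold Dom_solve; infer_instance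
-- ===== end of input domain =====

-- B replaces A's quadratic scan of all ordered pairs of marbles by closed-form counts (faster, asymptotic).

-- ===== PORT A =====
-- loop body of A's for-loop (state = (x, y))
def stepA (s : Int × Int) (m : Char × Char) : Int × Int :=
  if m.1 = 'R' then (if m.2 = 'B' then (s.1 + 1, s.2 + 1) else (s.1, s.2 + 1)) else s

-- itertools.permutations(lst, 2): ordered pairs of elements at distinct positions, in index order
def perms2 (lst : List Char) : List (Char × Char) :=
  (List.range lst.length).flatMap (fun i =>
    (List.range lst.length).filterMap (fun j =>
      if j = i then none else some (lst.getD i ' ', lst.getD j ' ')))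

def solve (reds : Int) (blues : Int) : List Int :=
  let R := List.replicate reds.toNat 'R'   -- ['R'] * reds (a negative count gives [], as in Python)
  let B := List.replicate blues.toNat 'B'
  let p := (perms2 (R ++ B)).foldl stepA (0, 0)
  let l : Int := Int.gcd p.1 p.2
  [PySem.Int.floordiv p.1 l, PySem.Int.floordiv p.2 l]

-- ===== PORT B =====
def solve_alt (reds : Int) (blues : Int) : List Int :=
  let x := reds * blues
  let y := reds * (reds + blues - 1)
  let l : Int := Int.gcd x y
  [PySem.Int.floordiv x l, PySem.Int.floordiv y l]

-- ===== PRECONDITION & SPEC =====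
-- Pre_ restricts to the natural domain of nonnegative marble counts with at least one red and
-- two marbles in total; outside it A either raises ZeroDivisionError (x = y = 0, so gcd = 0)
-- or returns a value produced by Python's negative-count list-repetition accident.
def Pre_solve (reds : Int) (blues : Int) : Prop := 1 ≤ reds ∧ 0 ≤ blues ∧ 2 ≤ reds + blues
instance (reds : Int) (blues : Int) : Decidable (Pre_solve reds blues) := by unfold Pre_solve; infer_instance

def pvWitness_solve : Int × Int := (2, 3)

def Spec_solve (reds : Int) (blues : Int) (out : List Int) : Prop := out = solve_alt reds blues
instance (reds : Int) (blues : Int) (out : List Int) : Decidable (Spec_solve reds blues out) := by unfold Spec_solve; infer_instance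

-- ===== CLAIM (what is proved, stated in full; the proofs are below) =====
def Claim_equal_solve : Prop := ∀ (reds : Int) (blues : Int), Dom_solve reds blues → Pre_solve reds blues → Spec_solve reds blues (solve reds blues)

-- ===== LEMMAS AND PROOFS =====

-- contribution of one pair to x resp. y
def cx (m : Char × Char) : Int := if m.1 = 'R' ∧ m.2 = 'B' then 1 else 0
def cy (m : Char × Char) : Int := if m.1 = 'R' then 1 else 0

theorem foldl_stepA (L : List (Char × Char)) (a c : Int) :
    L.foldl stepA (a, c) = (a + (L.map cx).sum, c + (L.map cy).sum) := by
  induction L generalizing a c with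
  | nil => simp
  | cons m t ih =>
    by_cases h1 : m.1 = 'R' <;> by_cases h2 : m.2 = 'B' <;>
      simp [stepA, cx, cy, h1, h2, ih] <;> first | (constructor <;> ring) | ring

theorem sum_filterMap_if (c : Char × Char → Int) (g : Nat → Char × Char) (i : Nat)
    (l : List Nat) :
    (((l.filterMap fun j => if j = i then none else some (g j))).map c).sum
      = (l.map fun j => if j = i then (0:Int) else c (g j)).sum := by
  induction l with
  | nil => simp
  | cons j t ih => by_cases h : j = i <;> simp [h, ih]

theorem getD_RB (r b j : Nat) (hj : j < r + b) :
    (List.replicate r 'R' ++ List.replicate b 'B').getD j ' ' = if j < r then 'R' else 'B' := by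
  split_ifs with h
  · rw [List.getD_append _ _ _ _ (by simpa using h)]
    simp [List.getD_eq_getElem?_getD, h]
  · rw [List.getD_append_right _ _ _ _ (by simpa using h)]
    simp only [List.length_replicate]
    rw [List.getD_eq_getElem?_getD]
    have hb : j - r < b := by omega
    simp [hb]

theorem sum_ite_const_range (m i : Nat) (him : i < m) :
    ((List.range m).map fun j => if j = i then (0:Int) else 1).sum = (m : Int) - 1 := by
  induction m with
  | zero => omega
  | succ m ih =>
    rw [List.range_succ]
    by_cases h : i = m
    · subst h
      have : (List.range i).map (fun j => if j = i then (0:Int) else 1)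
          = (List.range i).map (fun _ => (1:Int)) := by
        apply List.map_congr_left; intro j hj; simp [List.mem_range] at hj; simp; omega
      simp [this]
    · have hi : i < m := by omega
      have hm : ¬ (m = i) := by omega
      simp [ih hi, hm]

theorem inner_x_lt (r b i : Nat) (hi : i < r) :
    ((List.range (r + b)).map fun j => if j = i then (0:Int) else if j < r then 0 else 1).sum
      = (b : Int) := by
  rw [List.range_add]
  rw [List.map_append, List.sum_append]
  have h1 : (List.range r).map (fun j => if j = i then (0:Int) else if j < r then 0 else 1)
      = (List.range r).map (fun _ => (0:Int)) := by
    apply List.map_congr_left; intro j hj; simp [List.mem_range] at hj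
    by_cases h : j = i <;> simp [h, hj]
  have h2 : ((List.range b).map (r + ·)).map (fun j => if j = i then (0:Int) else if j < r then 0 else 1)
      = ((List.range b).map (r + ·)).map (fun _ => (1:Int)) := by
    apply List.map_congr_left; intro j hj
    simp only [List.mem_map, List.mem_range] at hj
    obtain ⟨k, _, rfl⟩ := hj
    have : ¬ (r + k = i) := by omega
    have : ¬ (r + k < r) := by omega
    simp; omega
  rw [h1, h2]
  simp [Function.comp_def]

theorem outer_sum (r b : Nat) (X : Int) :
    ((List.range (r + b)).map fun i => if i < r then X else 0).sum = (r : Int) * X := by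
  rw [List.range_add, List.map_append, List.sum_append]
  have h1 : (List.range r).map (fun i => if i < r then X else 0)
      = (List.range r).map (fun _ => X) := by
    apply List.map_congr_left; intro i hi; simp [List.mem_range] at hi; simp [hi]
  have h2 : ((List.range b).map (r + ·)).map (fun i => if i < r then X else 0)
      = ((List.range b).map (r + ·)).map (fun _ => (0:Int)) := by
    apply List.map_congr_left; intro i hi
    simp only [List.mem_map, List.mem_range] at hi
    obtain ⟨k, _, rfl⟩ := hi
    simp
  rw [h1, h2]
  simp [Function.comp_def, mul_comm]

-- the double sums over perms2 evaluate to the closed forms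
theorem sum_map_flatMap {α β : Type} (l : List α) (f : α → List β) (c : β → Int) :
    ((l.flatMap f).map c).sum = (l.map fun a => ((f a).map c).sum).sum := by
  induction l with
  | nil => simp
  | cons a t ih => simp [List.flatMap_cons, ih]

theorem perms2_sum_gen (r b : Nat) (c : Char × Char → Int) :
    ((perms2 (List.replicate r 'R' ++ List.replicate b 'B')).map c).sum
      = ((List.range (r + b)).map fun i =>
          ((List.range (r + b)).map fun j => if j = i then (0:Int)
            else c ((if i < r then 'R' else 'B'), if j < r then 'R' else 'B')).sum).sum := by
  have hlen : (List.replicate r 'R' ++ List.replicate b 'B').length = r + b := by simp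
  unfold perms2
  rw [hlen, sum_map_flatMap]
  congr 1
  apply List.map_congr_left
  intro i hi
  simp only [List.mem_range] at hi
  rw [sum_filterMap_if]
  congr 1
  apply List.map_congr_left
  intro j hj
  simp only [List.mem_range] at hj
  by_cases hji : j = i
  · simp [hji]
  · simp only [hji, if_false]
    rw [getD_RB r b i hi, getD_RB r b j hj]

theorem perms2_sums (r b : Nat) :
    (((perms2 (List.replicate r 'R' ++ List.replicate b 'B')).map cx).sum = (r : Int) * b)
    ∧ (((perms2 (List.replicate r 'R' ++ List.replicate b 'B')).map cy).sum
        = (r : Int) * ((r : Int) + (b : Int) - 1)) := by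
  constructor
  · rw [perms2_sum_gen]
    have h : (List.range (r + b)).map (fun i =>
        ((List.range (r + b)).map fun j => if j = i then (0:Int)
          else cx ((if i < r then 'R' else 'B'), if j < r then 'R' else 'B')).sum)
        = (List.range (r + b)).map (fun i => if i < r then (b:Int) else 0) := by
      apply List.map_congr_left
      intro i hi
      simp only [List.mem_range] at hi
      by_cases hir : i < r
      · have hin : (List.range (r + b)).map (fun j => if j = i then (0:Int)
            else cx ((if i < r then 'R' else 'B'), if j < r then 'R' else 'B'))
            = (List.range (r + b)).map (fun j => if j = i then (0:Int) else if j < r then 0 else 1) := by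
          apply List.map_congr_left
          intro j hj
          by_cases hji : j = i
          · simp [hji]
          · by_cases hjr : j < r <;> simp [hji, hjr, hir, cx]
        rw [hin, inner_x_lt r b i hir]
        simp [hir]
      · have hin : (List.range (r + b)).map (fun j => if j = i then (0:Int)
            else cx ((if i < r then 'R' else 'B'), if j < r then 'R' else 'B'))
            = (List.range (r + b)).map (fun _ => (0:Int)) := by
          apply List.map_congr_left
          intro j hj
          by_cases hji : j = i
          · simp [hji]
          · by_cases hjr : j < r <;> simp [hji, hjr, hir, cx]
        rw [hin]
        simp [hir]
    rw [h, outer_sum]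
  · rw [perms2_sum_gen]
    have h : (List.range (r + b)).map (fun i =>
        ((List.range (r + b)).map fun j => if j = i then (0:Int)
          else cy ((if i < r then 'R' else 'B'), if j < r then 'R' else 'B')).sum)
        = (List.range (r + b)).map (fun i => if i < r then ((r + b : Nat) : Int) - 1 else 0) := by
      apply List.map_congr_left
      intro i hi
      simp only [List.mem_range] at hi
      by_cases hir : i < r
      · have hin : (List.range (r + b)).map (fun j => if j = i then (0:Int)
            else cy ((if i < r then 'R' else 'B'), if j < r then 'R' else 'B'))
            = (List.range (r + b)).map (fun j => if j = i then (0:Int) else 1) := by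
          apply List.map_congr_left
          intro j hj
          by_cases hji : j = i
          · simp [hji]
          · by_cases hjr : j < r <;> simp [hji, hir, cy]
        rw [hin, sum_ite_const_range (r + b) i hi]
        simp [hir]
      · have hin : (List.range (r + b)).map (fun j => if j = i then (0:Int)
            else cy ((if i < r then 'R' else 'B'), if j < r then 'R' else 'B'))
            = (List.range (r + b)).map (fun _ => (0:Int)) := by
          apply List.map_congr_left
          intro j hj
          by_cases hji : j = i
          · simp [hji]
          · by_cases hjr : j < r <;> simp [hji, hir, cy]
        rw [hin]
        simp [hir]
    rw [h, outer_sum]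
    push_cast
    ring

theorem solve_closed (reds blues : Int) (hr : 0 ≤ reds) (hb : 0 ≤ blues) :
    solve reds blues = solve_alt reds blues := by
  unfold solve solve_alt
  have hfold := foldl_stepA (perms2 (List.replicate reds.toNat 'R' ++ List.replicate blues.toNat 'B')) 0 0
  have hs := perms2_sums reds.toNat blues.toNat
  have hmr : (reds.toNat : Int) = reds := Int.toNat_of_nonneg hr
  have hmb : (blues.toNat : Int) = blues := Int.toNat_of_nonneg hb
  simp only [hfold, hs.1, hs.2, zero_add, hmr, hmb]

-- ===== VERDICT (by name: the statement is the Claim_ definition above) =====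
theorem solve_spec : Claim_equal_solve := by
  intro reds blues _ hpre
  obtain ⟨h1, h2, _⟩ := hpre
  unfold Spec_solve
  exact solve_closed reds blues (by omega) h2
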